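-- pv_equiv track=rewrite | github.com/jonasleitner/adcgen | sympy_adc/isr.py | __generate_lower_spaces
-- ===== SOURCE A (Python) =====
-- def __generate_lower_spaces(space_str):
--     """Generate all lower spaces for the provided space string, e.g.
--        ['ph'] for 'pphh'."""
--     lower_spaces = []
--     for _ in range(min(space_str.count('p'), space_str.count('h'))):
--         space_str = space_str.replace('p', '', 1).replace('h', '', 1)
--         if not space_str:
--             break
--         lower_spaces.append(space_str)
--     return lower_spaces
-- ===== SOURCE B (Python) =====
-- def __generate_lower_spaces(space_str):
--     """Generate all lower spaces for the provided space string, e.g.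
--        ['ph'] for 'pphh'."""
--     if min(space_str.count('p'), space_str.count('h')) == 0:
--         return []
--     reduced = space_str.replace('p', '', 1).replace('h', '', 1)
--     if not reduced:
--         return []
--     return [reduced] + __generate_lower_spaces(reduced)
-- ===== Notes on version B (the rewrite author's own statement) =====
-- stated objective: alternative
-- what changed: Replaced the accumulating loop bounded by a precomputed min(count_p,count_h) with a recursive descent that recomputes the base case on each successively reduced string and builds the result front-to-back.
import Mathlib
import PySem

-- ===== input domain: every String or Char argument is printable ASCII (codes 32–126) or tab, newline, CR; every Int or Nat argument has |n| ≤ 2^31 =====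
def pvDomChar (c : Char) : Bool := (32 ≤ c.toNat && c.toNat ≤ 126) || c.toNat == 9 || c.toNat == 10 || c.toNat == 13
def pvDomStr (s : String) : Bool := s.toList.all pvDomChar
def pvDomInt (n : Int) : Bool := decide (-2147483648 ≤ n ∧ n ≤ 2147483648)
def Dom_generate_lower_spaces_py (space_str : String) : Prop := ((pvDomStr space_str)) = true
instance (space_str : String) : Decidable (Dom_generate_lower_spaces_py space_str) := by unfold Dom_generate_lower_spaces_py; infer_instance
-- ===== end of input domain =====

-- B replaces A's accumulating loop (bounded by a precomputed min of counts) with a recursive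
-- descent over successively reduced strings; objective: alternative decomposition, same cost.


-- ===== PORT A =====
-- `s.replace('p', '', 1)` for a single-character pattern removes the first occurrence of that
-- character, which is exactly `List.erase`; `s.count('p')` for a single character is `List.count`.
def pvALoop : Nat → List Char → List String → List String
  | 0, _, lower => lower
  | Nat.succ n, s, lower =>
      let s' := (s.erase 'p').erase 'h'
      if s' = [] then lower
      else pvALoop n s' (lower ++ [String.ofList s'])

def generate_lower_spaces_py (space_str : String) : List String :=
  pvALoop (min (space_str.toList.count 'p') (space_str.toList.count 'h')) space_str.toList []

-- ===== PORT B =====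
def pvBGo (s : List Char) : List String :=
  if h : min (s.count 'p') (s.count 'h') = 0 then []
  else
    let r := (s.erase 'p').erase 'h'
    if r = [] then []
    else String.ofList r :: pvBGo r
termination_by s.length
decreasing_by
  have hp : 'p' ∈ s := by
    rw [← List.count_pos_iff]
    omega
  have h1 := List.length_erase_of_mem hp
  have h2 : ((s.erase 'p').erase 'h').length ≤ (s.erase 'p').length := List.length_erase_le
  have h3 := List.length_pos_of_mem hp
  omega

def generate_lower_spaces_py_alt (space_str : String) : List String :=
  pvBGo space_str.toList

-- ===== PRECONDITION & SPEC =====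
def Spec_generate_lower_spaces_py (space_str : String) (out : List String) : Prop := out = generate_lower_spaces_py_alt space_str
instance (space_str : String) (out : List String) : Decidable (Spec_generate_lower_spaces_py space_str out) := by unfold Spec_generate_lower_spaces_py; infer_instance

-- ===== CLAIM (what is proved, stated in full; the proofs are below) =====
def Claim_equal_generate_lower_spaces_py : Prop := ∀ (space_str : String), Dom_generate_lower_spaces_py space_str → Spec_generate_lower_spaces_py space_str (generate_lower_spaces_py space_str)

-- ===== LEMMAS AND PROOFS =====

theorem pvALoop_eq (N : Nat) : ∀ (s : List Char), s.length ≤ N → ∀ (lower : List String),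
    pvALoop (min (s.count 'p') (s.count 'h')) s lower = lower ++ pvBGo s := by
  induction N with
  | zero =>
      intro s hs lower
      have : s = [] := List.eq_nil_of_length_eq_zero (Nat.le_zero.mp hs)
      subst this
      simp [pvALoop, pvBGo]
  | succ N ih =>
      intro s hs lower
      by_cases hmin : min (s.count 'p') (s.count 'h') = 0
      · rw [hmin, pvBGo]
        simp [hmin, pvALoop]
      · obtain ⟨n, hn⟩ : ∃ n, min (s.count 'p') (s.count 'h') = n + 1 :=
          ⟨_, (Nat.succ_pred_eq_of_pos (Nat.pos_of_ne_zero hmin)).symm⟩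
        have hp : 'p' ∈ s := by
          rw [← List.count_pos_iff]; omega
        set r := (s.erase 'p').erase 'h' with hr
        have hcp : r.count 'p' = s.count 'p' - 1 := by
          rw [hr, List.count_erase_of_ne (by decide), List.count_erase_self]
        have hch : r.count 'h' = s.count 'h' - 1 := by
          rw [hr, List.count_erase_self, List.count_erase_of_ne (by decide)]
        have hminr : min (r.count 'p') (r.count 'h') = n := by omega
        have hlen : r.length < s.length := by
          have h1 := List.length_erase_of_mem hp
          have h2 : r.length ≤ (s.erase 'p').length := List.length_erase_le
          have h3 := List.length_pos_of_mem hp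
          omega
        rw [hn, pvBGo]
        simp only [pvALoop, ← hr, hmin, dite_false]
        by_cases hre : r = []
        · simp [hre]
        · simp only [if_neg hre]
          rw [← hminr, ih r (by omega) (lower ++ [String.ofList r]), List.append_assoc]
          rfl

-- ===== VERDICT (by name: the statement is the Claim_ definition above) =====
theorem generate_lower_spaces_py_spec : Claim_equal_generate_lower_spaces_py := by
  intro s _
  unfold Spec_generate_lower_spaces_py generate_lower_spaces_py generate_lower_spaces_py_alt
  simpa using pvALoop_eq s.toList.length s.toList le_rfl []
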